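-- pv_equiv track=rewrite | github.com/betgws/programmers | 서버증설횟수.py | solution
-- ===== SOURCE A (Python) =====
-- from collections import deque
--
-- def solution(players, m, k):
--     answer = 0
--
--     queue = deque()
--     for i in range(k):
--         queue.append(0)
--
--     for i in players:
--         p = 0
--         q = queue.popleft()
--         if(i<(q+1)*m):
--             queue.append(0)
--         else:
--             while(i>=(p+q+1)*m):
--                 p = p+1
--             for j in range(len(queue)):
--                 a = queue.popleft()
--                 queue.append(a+p)
--             queue.append(p)
--
--             answer = answer + p
--
--     return answer
-- ===== SOURCE B (Python) =====
-- def solution(players, m, k):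
--     # Sliding-window running sum of still-active expansions + direct arithmetic
--     # instead of A's deque rotation and counting while-loop.
--     answer = 0
--     active = 0          # sum of the expansions of hours idx-k .. idx-1
--     exps = []           # exps[t] = servers added at hour t
--     for idx, load in enumerate(players):
--         if idx > k:
--             active -= exps[idx - k - 1]
--         p = load // m - active
--         if p < 0:
--             p = 0
--         exps.append(p)
--         active += p
--         answer += p
--     return answer
-- ===== Notes on version B (the rewrite author's own statement) =====
-- stated objective: faster
-- what changed: Replaces A's per-hour deque rotation (adding p to every queue entry) and unit-step counting while-loop by a single pass keeping a sliding-window running sum of the expansions still active, computing each hour's expansion directly as max(0, load//m - active).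
-- outside the precondition, e.g. on solution([-10], -5, 1): A returns 0, B returns 2; on solution([5], 1, 0): A raises IndexError, B returns 5
import Mathlib
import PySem

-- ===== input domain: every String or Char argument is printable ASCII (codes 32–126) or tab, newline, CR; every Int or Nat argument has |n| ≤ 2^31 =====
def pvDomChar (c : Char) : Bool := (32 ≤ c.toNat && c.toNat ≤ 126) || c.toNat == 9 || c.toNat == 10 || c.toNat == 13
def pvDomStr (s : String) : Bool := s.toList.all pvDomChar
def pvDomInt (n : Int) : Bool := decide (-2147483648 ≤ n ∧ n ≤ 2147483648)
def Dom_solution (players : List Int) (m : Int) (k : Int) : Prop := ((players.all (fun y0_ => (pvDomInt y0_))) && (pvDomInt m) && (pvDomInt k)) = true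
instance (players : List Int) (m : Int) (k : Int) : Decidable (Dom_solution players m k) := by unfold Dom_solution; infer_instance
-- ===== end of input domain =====

-- B replaces A's O(k)-per-hour deque rotation and unit-step counting loop by a sliding-window
-- running sum of still-active expansions plus one floor division per hour (objective: faster).

-- ===== PORT A =====
-- collections.deque, ported as the standard two-list functional queue (front, back);
-- the deque's contents are front ++ back.reverse; popleft/append are exact and O(1) amortized
def dqAppend (dq : List Int × List Int) (x : Int) : List Int × List Int :=
  (dq.1, x :: dq.2)

def dqPopleft (dq : List Int × List Int) : Option (Int × (List Int × List Int)) :=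
  match dq.1 with
  | x :: f => some (x, (f, dq.2))
  | [] =>
    match dq.2.reverse with
    | x :: f => some (x, (f, []))
    | [] => none          -- popleft on an empty deque: IndexError

def dqLen (dq : List Int × List Int) : Nat := dq.1.length + dq.2.length

-- while(i>=(p+q+1)*m): p = p+1   — fuel bound i.toNat+1 is enough under Pre_ (m ≥ 1, q ≥ 0)
def solWhile (fuel : Nat) (i q m p : Int) : Int :=
  match fuel with
  | 0 => p
  | Nat.succ f => if (p + q + 1) * m ≤ i then solWhile f i q m (p + 1) else p

def solStep (m : Int) (st : Int × (List Int × List Int)) (i : Int) : Int × (List Int × List Int) :=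
  match st with
  | (answer, queue) =>
    match dqPopleft queue with
    | none => (answer, ([], []))   -- queue.popleft() raised IndexError; excluded by Pre_
    | some (q, rest) =>
      if i < (q + 1) * m then
        (answer, dqAppend rest 0)
      else
        let p := solWhile (i.toNat + 1) i q m 0
        -- for j in range(len(queue)): a = queue.popleft(); queue.append(a+p)  (len is a Nat here)
        let rotated := (List.range (dqLen rest)).foldl
          (fun qq _ => match dqPopleft qq with
                       | none => qq
                       | some (a, r) => dqAppend r (a + p)) rest
        (answer + p, dqAppend rotated p)

def solution (players : List Int) (m : Int) (k : Int) : Int :=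
  let queue := (PySem.List.pyRange 0 k 1).foldl (fun dq _ => dqAppend dq 0)
    (([], []) : List Int × List Int)
  (players.foldl (solStep m) (0, queue)).1

-- ===== PORT B =====
-- idx in the Python is the enumerate counter = exps.length at each step
def altStep (m : Int) (k : Int) (st : Int × Int × List Int) (load : Int) : Int × Int × List Int :=
  match st with
  | (answer, active, exps) =>
    let idx : Int := exps.length
    let active := if k < idx then active - (PySem.List.pyGet? exps (idx - k - 1)).getD 0 else active
    let p0 := PySem.Int.floordiv load m - active
    let p := if p0 < 0 then 0 else p0
    (answer + p, active + p, exps ++ [p])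

def solution_alt (players : List Int) (m : Int) (k : Int) : Int :=
  (players.foldl (altStep m k) (0, 0, [])).1

-- ===== PRECONDITION & SPEC =====
-- Pre_ restricts to the natural domain m ≥ 1 and k ≥ 1 (or no players at all): for m ≤ 0 A
-- diverges as soon as any load reaches the expansion branch, and for k ≤ 0 with nonempty
-- players A raises IndexError on the empty deque.
def Pre_solution (players : List Int) (m : Int) (k : Int) : Prop :=
  players = [] ∨ (1 ≤ m ∧ 1 ≤ k)
instance (players : List Int) (m : Int) (k : Int) : Decidable (Pre_solution players m k) := by
  unfold Pre_solution; infer_instance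

def pvWitness_solution : List Int × Int × Int := ([3, 1, 4], 2, 2)

def Spec_solution (players : List Int) (m : Int) (k : Int) (out : Int) : Prop := out = solution_alt players m k
instance (players : List Int) (m : Int) (k : Int) (out : Int) : Decidable (Spec_solution players m k out) := by unfold Spec_solution; infer_instance

-- ===== CLAIM (what is proved, stated in full; the proofs are below) =====
def Claim_equal_solution : Prop := ∀ (players : List Int) (m : Int) (k : Int), Dom_solution players m k → Pre_solution players m k → Spec_solution players m k (solution players m k)

-- ===== LEMMAS AND PROOFS =====

-- the deque's contents as a plain list
def dqToList (dq : List Int × List Int) : List Int := dq.1 ++ dq.2.reverse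

lemma dqToList_append (dq : List Int × List Int) (x : Int) :
    dqToList (dqAppend dq x) = dqToList dq ++ [x] := by
  simp [dqToList, dqAppend]

lemma dqLen_eq (dq : List Int × List Int) : dqLen dq = (dqToList dq).length := by
  simp [dqLen, dqToList]

-- one step of `a = queue.popleft(); queue.append(a+p)` at the plain-list level
def rotG (p : Int) (qq : List Int) : List Int :=
  match qq with
  | [] => []
  | a :: r => r ++ [a + p]

lemma dqPopleft_eq (dq : List Int × List Int) (q : Int) (rest : List Int)
    (h : dqToList dq = q :: rest) :
    ∃ dq', dqPopleft dq = some (q, dq') ∧ dqToList dq' = rest := by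
  obtain ⟨f, b⟩ := dq
  cases f with
  | cons x f' =>
    simp [dqToList] at h
    exact ⟨(f', b), by simp [dqPopleft, h.1], by simp [dqToList, h.2]⟩
  | nil =>
    simp [dqToList] at h
    exact ⟨(rest, []), by simp [dqPopleft, h], by simp [dqToList]⟩

lemma dqPopleft_none (dq : List Int × List Int) (h : dqToList dq = []) :
    dqPopleft dq = none := by
  obtain ⟨f, b⟩ := dq
  simp [dqToList] at h
  simp [dqPopleft, h.1, h.2]

-- one step of `a = queue.popleft(); queue.append(a+p)`, as seen through dqToList
lemma rotG_step (p : Int) (dq : List Int × List Int) :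
    dqToList (match dqPopleft dq with
              | none => dq
              | some (a, r) => dqAppend r (a + p)) = rotG p (dqToList dq) := by
  cases h : dqToList dq with
  | nil => rw [dqPopleft_none dq h]; simp [rotG, h]
  | cons q rest =>
    obtain ⟨dq', hpop, hrest⟩ := dqPopleft_eq dq q rest h
    rw [hpop]
    simp [rotG, dqToList_append, hrest]

lemma dq_fold_rot (p : Int) (l : List Nat) : ∀ (dq : List Int × List Int),
    dqToList (l.foldl (fun qq _ => match dqPopleft qq with
                                   | none => qq
                                   | some (a, r) => dqAppend r (a + p)) dq)
      = l.foldl (fun qq _ => rotG p qq) (dqToList dq) := by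
  induction l with
  | nil => intro dq; rfl
  | cons x l ih =>
    intro dq
    rw [List.foldl_cons, List.foldl_cons, ih, rotG_step]

lemma dq_fold_zero (l : List Int) : ∀ (dq : List Int × List Int),
    dqToList (l.foldl (fun d _ => dqAppend d 0) dq)
      = l.foldl (fun q _ => q ++ [(0 : Int)]) (dqToList dq) := by
  induction l with
  | nil => intro dq; rfl
  | cons x l ih =>
    intro dq
    rw [List.foldl_cons, List.foldl_cons, ih, dqToList_append]

-- queue contents as windows over the reversed expansion history:
-- position j holds the sum of the last (kn - j) expansions
def win (rexps : List Int) (kn : Nat) : List Int :=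
  (List.range kn).map (fun j => (rexps.take (kn - j)).sum)

lemma win_succ (r : List Int) (kn : Nat) :
    win r (kn + 1) = (r.take (kn + 1)).sum :: win r kn := by
  simp [win, List.range_succ_eq_map, List.map_map, Function.comp_def]

lemma win_nil (kn : Nat) : win [] kn = List.replicate kn 0 := by
  simp [win]

lemma win_shift (p : Int) (r : List Int) (kn : Nat) :
    win (p :: r) (kn + 1) = (win r kn).map (· + p) ++ [p] := by
  induction kn with
  | zero => simp [win]
  | succ n ih =>
    rw [win_succ, ih, win_succ, List.map_cons]
    rw [List.take_succ_cons]
    simp [add_comm]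

lemma rot_aux (p : Int) : ∀ (q1 q2 : List Int),
    (List.range q1.length).foldl (fun qq _ => rotG p qq) (q1 ++ q2) = q2 ++ q1.map (· + p) := by
  intro q1
  induction q1 with
  | nil => simp
  | cons a r ih =>
    intro q2
    rw [List.length_cons, List.range_succ_eq_map, List.foldl_cons, List.foldl_map]
    show (List.range r.length).foldl (fun qq _ => rotG p qq) (rotG p ((a :: r) ++ q2)) = _
    have : rotG p ((a :: r) ++ q2) = r ++ (q2 ++ [a + p]) := by simp [rotG]
    rw [this, ih]
    simp

lemma rot_full (p : Int) (q : List Int) :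
    (List.range q.length).foldl (fun qq _ => rotG p qq) q = q.map (· + p) := by
  have h := rot_aux p q []
  simpa using h

lemma solWhile_eq (i q m : Int) (hm : 1 ≤ m) :
    ∀ (f : Nat) (p : Int), PySem.Int.floordiv i m - q ≤ p + f →
      solWhile f i q m p = max p (PySem.Int.floordiv i m - q) := by
  intro f
  induction f with
  | zero => intro p h; simp only [solWhile]; omega
  | succ n ih =>
    intro p h
    have hcond : ((p + q + 1) * m ≤ i) ↔ (p + q + 1 ≤ PySem.Int.floordiv i m) :=
      (PySem.Int.le_floordiv_iff_mul_le (by omega)).symm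
    simp only [solWhile]
    split_ifs with hc
    · rw [ih (p + 1) (by omega)]
      rw [hcond] at hc
      omega
    · rw [hcond] at hc
      omega

lemma repl_fold (l : List Int) : ∀ (acc : List Int),
    l.foldl (fun q _ => q ++ [(0 : Int)]) acc = acc ++ List.replicate l.length 0 := by
  induction l with
  | nil => simp
  | cons a r ih => intro acc; rw [List.foldl_cons, ih]; simp [List.replicate_succ]

lemma loop_eq (m k : Int) (hm : 1 ≤ m) (hk : 1 ≤ k) :
    ∀ (ps exps : List Int) (ans activ : Int) (dq : List Int × List Int),
      (∀ x ∈ exps, 0 ≤ x) →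
      activ = (exps.reverse.take (k.toNat + 1)).sum →
      dqToList dq = win exps.reverse k.toNat →
      (ps.foldl (solStep m) (ans, dq)).1
        = (ps.foldl (altStep m k) (ans, activ, exps)).1 := by
  intro ps
  induction ps with
  | nil => intro exps ans activ dq _ _ _; rfl
  | cons i ps ih =>
    intro exps ans activ dq hnn hact hdq
    obtain ⟨n, hn⟩ : ∃ n, k.toNat = n + 1 := ⟨k.toNat - 1, by omega⟩
    have hwin : dqToList dq = (exps.reverse.take k.toNat).sum :: win exps.reverse n := by
      rw [hdq, hn]; exact win_succ _ n
    set q : Int := (exps.reverse.take k.toNat).sum with hqdef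
    obtain ⟨dq', hpop, hrest⟩ := dqPopleft_eq dq q _ hwin
    -- B's window subtraction yields exactly the value A pops
    have hactive' : (if k < (exps.length : Int) then
          activ - (PySem.List.pyGet? exps ((exps.length : Int) - k - 1)).getD 0 else activ) = q := by
      split_ifs with hlt
      · have hlen : k.toNat < exps.length := by omega
        have hidx : (exps.length : Int) - k - 1 = ((exps.length - k.toNat - 1 : Nat) : Int) := by omega
        rw [hidx, PySem.List.pyGet?_natCast,
          List.getElem?_eq_getElem (by omega : exps.length - k.toNat - 1 < exps.length)]
        have hklen : k.toNat < exps.reverse.length := by simpa using hlen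
        have hrev : exps[exps.length - k.toNat - 1] = exps.reverse[k.toNat]'hklen := by
          rw [List.getElem_reverse]; congr 1; omega
        have hsum : (exps.reverse.take (k.toNat + 1)).sum
            = (exps.reverse.take k.toNat).sum + exps.reverse[k.toNat]'hklen :=
          List.sum_take_succ _ _ hklen
        rw [hact, hsum, hrev, Option.getD_some]
        ring
      · have hlen : exps.reverse.length ≤ k.toNat := by simp; omega
        rw [hact, hqdef, List.take_of_length_le (by omega), List.take_of_length_le hlen]
    have hq0 : 0 ≤ q := by
      apply List.sum_nonneg
      intro x hx
      exact hnn x (List.mem_reverse.mp (List.mem_of_mem_take hx))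
    have hbridge : ((q + 1) * m ≤ i) ↔ (q + 1 ≤ PySem.Int.floordiv i m) :=
      (PySem.Int.le_floordiv_iff_mul_le (by omega)).symm
    rw [List.foldl_cons, List.foldl_cons]
    simp only [solStep, altStep, hpop]
    rw [hactive']
    by_cases hbr : i < (q + 1) * m
    · rw [if_pos hbr]
      have hd : PySem.Int.floordiv i m ≤ q := by
        by_contra hcon
        exact absurd (hbridge.mpr (by omega)) (by omega)
      have hpB : (if PySem.Int.floordiv i m - q < 0 then (0 : Int)
          else PySem.Int.floordiv i m - q) = 0 := by split_ifs <;> omega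
      rw [hpB]
      have hqueue : dqToList (dqAppend dq' 0) = win (exps ++ [0]).reverse k.toNat := by
        rw [dqToList_append, hrest, List.reverse_append, List.reverse_singleton,
          List.singleton_append, hn, win_shift]
        simp
      have := ih (exps ++ [0]) ans (q + 0) (dqAppend dq' 0)
        (by intro x hx; rcases List.mem_append.mp hx with h | h
            · exact hnn x h
            · simp at h; omega)
        (by rw [List.reverse_append, List.reverse_singleton, List.singleton_append, hn,
              List.take_succ_cons, List.sum_cons, hqdef, hn]; ring)
        hqueue
      simpa using this
    · rw [if_neg hbr]
      have hd : q + 1 ≤ PySem.Int.floordiv i m := hbridge.mp (by omega)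
      have hi0 : 0 ≤ i := by nlinarith
      have hdle : PySem.Int.floordiv i m ≤ i := by
        rw [PySem.Int.floordiv_eq_ediv_of_pos (by omega)]
        exact Int.ediv_le_self m hi0
      have hpA : solWhile (i.toNat + 1) i q m 0 = PySem.Int.floordiv i m - q := by
        rw [solWhile_eq i q m hm _ 0 (by omega)]; omega
      have hpB : (if PySem.Int.floordiv i m - q < 0 then (0 : Int)
          else PySem.Int.floordiv i m - q) = PySem.Int.floordiv i m - q := by
        split_ifs <;> omega
      rw [hpA, hpB]
      set p : Int := PySem.Int.floordiv i m - q with hpdef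
      have hqueue : dqToList (dqAppend ((List.range (dqLen dq')).foldl
            (fun qq _ => match dqPopleft qq with
                         | none => qq
                         | some (a, r) => dqAppend r (a + p)) dq') p)
          = win (exps ++ [p]).reverse k.toNat := by
        rw [dqToList_append, dq_fold_rot, hrest, dqLen_eq, hrest, rot_full,
          List.reverse_append, List.reverse_singleton, List.singleton_append, hn, win_shift]
      exact ih (exps ++ [p]) (ans + p) (q + p) _
        (by intro x hx; rcases List.mem_append.mp hx with h | h
            · exact hnn x h
            · simp at h; omega)
        (by rw [List.reverse_append, List.reverse_singleton, List.singleton_append, hn,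
              List.take_succ_cons, List.sum_cons, hqdef, hn]; ring)
        hqueue

-- ===== VERDICT (by name: the statement is the Claim_ definition above) =====
theorem solution_spec : Claim_equal_solution := by
  intro players m k _hdom hpre
  unfold Spec_solution
  rcases hpre with h | ⟨hm, hk⟩
  · subst h; rfl
  · show (players.foldl (solStep m) (0, _)).1 = _
    apply loop_eq m k hm hk players [] 0 0 _ (by simp) (by simp)
    rw [dq_fold_zero, repl_fold]
    simp [win_nil, dqToList, pysem]
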